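-- pv_equiv track=rewrite | github.com/weldonj/CA4023_Sentiment_Analysis_BERT | _build/jupyter_execute/Bigram-NegationHandling.py | get_document_preview
-- ===== SOURCE A (Python) =====
-- def get_document_preview(document, max_length = 72):
--     s = []
--     count = 0
--     reached_limit = False
--     for sentence in document:
--         i = 0
--         while (i < len(sentence) - 1):
--             token = sentence[i] + ' ' + sentence[i+1]
--             if count + len(token) + len(s) > max_length:
--                 reached_limit = True
--                 break
--
--             s.append(token)
--             count += len(token)
--             i+=1
--         if reached_limit:
--             break
--     return '|'.join(s)
-- ===== SOURCE B (Python) =====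
-- def get_document_preview(document, max_length = 72):
--     # Stage 1: flatten the document into its complete list of bigram tokens.
--     bigrams = [w + ' ' + x for sentence in document
--                            for w, x in zip(sentence, sentence[1:])]
--     # Stage 2: cumulative '|'-joined cost; cum[k] - 1 is the joined length of
--     # the first k tokens (each token costs len(token) + 1 for its separator).
--     cum = [0]
--     for t in bigrams:
--         cum.append(cum[-1] + len(t) + 1)
--     # Stage 3: costs are strictly increasing, so the greedy cut-off point is
--     # simply the number of prefixes whose joined length fits within max_length.
--     k = sum(1 for c in cum[1:] if c - 1 <= max_length)
--     return '|'.join(bigrams[:k])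
-- ===== Notes on version B (the rewrite author's own statement) =====
-- stated objective: alternative
-- what changed: Replaces A's nested loops with break-flag and running-counter bookkeeping by three stages: flatten all bigrams via zip, build the cumulative joined-cost array, and take the prefix whose strictly increasing joined length fits max_length (computed by counting fitting prefixes, no early exit), then join that slice once.
import Mathlib
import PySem

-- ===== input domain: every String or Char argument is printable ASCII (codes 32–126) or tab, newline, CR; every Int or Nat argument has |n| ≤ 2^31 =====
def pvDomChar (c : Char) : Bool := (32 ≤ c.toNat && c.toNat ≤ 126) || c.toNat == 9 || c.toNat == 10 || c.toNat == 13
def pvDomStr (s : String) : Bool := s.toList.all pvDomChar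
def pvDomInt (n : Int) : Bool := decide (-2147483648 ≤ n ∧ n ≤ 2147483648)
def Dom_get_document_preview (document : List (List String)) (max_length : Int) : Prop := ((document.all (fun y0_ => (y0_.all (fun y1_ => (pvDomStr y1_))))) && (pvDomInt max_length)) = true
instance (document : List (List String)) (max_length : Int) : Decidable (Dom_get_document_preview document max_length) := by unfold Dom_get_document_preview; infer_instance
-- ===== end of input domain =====

-- B replaces A's nested break-flag loops by staged passes: flat bigram list, cumulative joined-cost
-- array, count of fitting prefixes, one slice-and-join (objective: alternative); equal output everywhere.

-- ===== PORT A =====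
-- inner while-loop of A: state (s, count), index i; third component = reached_limit
def pvInnerA (max_length : Int) (sentence : List String) (s : List String) (count : Int) (i : Nat) : List String × Int × Bool :=
  if h : (i : Int) < (sentence.length : Int) - 1 then
    let token := PySem.List.pyGetD sentence (i : Int) "" ++ " " ++ PySem.List.pyGetD sentence ((i : Int) + 1) ""
    if count + PySem.Str.len token + (s.length : Int) > max_length then (s, count, true)
    else pvInnerA max_length sentence (s ++ [token]) (count + PySem.Str.len token) (i + 1)
  else (s, count, false)
termination_by sentence.length - i
decreasing_by omega

-- outer for-loop of A with the reached_limit break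
def pvOuterA (max_length : Int) : List (List String) → List String → Int → List String
  | [], s, _ => s
  | sentence :: rest, s, count =>
    match pvInnerA max_length sentence s count 0 with
    | (s', _, true) => s'
    | (s', count', false) => pvOuterA max_length rest s' count'

def get_document_preview (document : List (List String)) (max_length : Int) : String :=
  PySem.Str.join "|" (pvOuterA max_length document [] 0)

-- ===== PORT B =====
-- stage 1: flat list of bigram tokens, zip(sentence, sentence[1:]) over all sentences
def pvBigramsB (document : List (List String)) : List String :=
  document.flatMap (fun sentence =>
    (sentence.zip (PySem.List.slice sentence (some 1) none)).map (fun p => p.1 ++ " " ++ p.2))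

-- stage 2: the cumulative cost loop 'cum.append(cum[-1] + len(t) + 1)'
def pvCumB : List String → List Int → List Int
  | [], cum => cum
  | t :: rest, cum => pvCumB rest (cum ++ [PySem.List.pyGetD cum (-1) 0 + PySem.Str.len t + 1])

def get_document_preview_alt (document : List (List String)) (max_length : Int) : String :=
  let bigrams := pvBigramsB document
  let cum := pvCumB bigrams [0]
  -- stage 3: k = sum(1 for c in cum[1:] if c - 1 <= max_length)
  let k := (PySem.List.slice cum (some 1) none).countP (fun c => decide (c - 1 ≤ max_length))
  PySem.Str.join "|" (bigrams.take k)

-- ===== PRECONDITION & SPEC =====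
def Spec_get_document_preview (document : List (List String)) (max_length : Int) (out : String) : Prop := out = get_document_preview_alt document max_length
instance (document : List (List String)) (max_length : Int) (out : String) : Decidable (Spec_get_document_preview document max_length out) := by unfold Spec_get_document_preview; infer_instance

-- ===== CLAIM (what is proved, stated in full; the proofs are below) =====
def Claim_equal_get_document_preview : Prop := ∀ (document : List (List String)) (max_length : Int), Dom_get_document_preview document max_length → Spec_get_document_preview document max_length (get_document_preview document max_length)

-- ===== LEMMAS AND PROOFS =====

-- common greedy accumulator A's two nested loops compute over the flat token list
def pvGreedy (max_length : Int) : List String → List String → Int → List String × Int × Bool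
  | [], s, count => (s, count, false)
  | t :: rest, s, count =>
    if count + PySem.Str.len t + (s.length : Int) > max_length then (s, count, true)
    else pvGreedy max_length rest (s ++ [t]) (count + PySem.Str.len t)

-- the bigram tokens of a sentence from index i on
def pvToksFrom (sentence : List String) (i : Nat) : List String :=
  ((sentence.drop i).zip (sentence.drop (i + 1))).map (fun p => p.1 ++ " " ++ p.2)

lemma pvToksFrom_cons (sentence : List String) (i : Nat) (h : i + 1 < sentence.length) :
    pvToksFrom sentence i =
      (sentence.getD i "" ++ " " ++ sentence.getD (i + 1) "") :: pvToksFrom sentence (i + 1) := by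
  have h1 : i < sentence.length := by omega
  have e1 : sentence.drop i = sentence[i] :: sentence.drop (i + 1) := List.drop_eq_getElem_cons h1
  have e2 : sentence.drop (i + 1) = sentence[i + 1] :: sentence.drop (i + 1 + 1) := List.drop_eq_getElem_cons h
  simp only [pvToksFrom]
  rw [e1, e2, List.zip_cons_cons, List.map_cons]
  rw [List.getD_eq_getElem _ _ h1, List.getD_eq_getElem _ _ h]

lemma pvToksFrom_nil (sentence : List String) (i : Nat) (h : ¬ i + 1 < sentence.length) :
    pvToksFrom sentence i = [] := by
  have : sentence.drop (i + 1) = [] := List.drop_eq_nil_of_le (by omega)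
  simp [pvToksFrom, this]

lemma pvInnerA_eq (max_length : Int) (sentence : List String) (s : List String) (count : Int) (i : Nat) :
    pvInnerA max_length sentence s count i = pvGreedy max_length (pvToksFrom sentence i) s count := by
  fun_induction pvInnerA with
  | case1 s count i h token htok =>
    have h' : i + 1 < sentence.length := by omega
    rw [pvToksFrom_cons sentence i h']
    have heq : token = sentence.getD i "" ++ " " ++ sentence.getD (i + 1) "" := by
      simp only [token]
      rw [PySem.List.pyGetD_natCast,
        show ((i : Int) + 1) = ((i + 1 : Nat) : Int) by push_cast; ring,
        PySem.List.pyGetD_natCast]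
    simp only [pvGreedy]
    rw [← heq, if_pos htok]
  | case2 s count i h token htok ih =>
    have h' : i + 1 < sentence.length := by omega
    rw [pvToksFrom_cons sentence i h']
    have heq : token = sentence.getD i "" ++ " " ++ sentence.getD (i + 1) "" := by
      simp only [token]
      rw [PySem.List.pyGetD_natCast,
        show ((i : Int) + 1) = ((i + 1 : Nat) : Int) by push_cast; ring,
        PySem.List.pyGetD_natCast]
    simp only [pvGreedy]
    rw [← heq, if_neg htok]
    exact ih
  | case3 s count i h =>
    rw [pvToksFrom_nil sentence i (by omega)]
    rfl

lemma pvGreedy_append (max_length : Int) :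
    ∀ (xs ys : List String) (s : List String) (count : Int),
      pvGreedy max_length (xs ++ ys) s count =
        match pvGreedy max_length xs s count with
        | (s', c', true) => (s', c', true)
        | (s', c', false) => pvGreedy max_length ys s' c' := by
  intro xs
  induction xs with
  | nil => intro ys s count; simp [pvGreedy]
  | cons x xs ih =>
    intro ys s count
    simp only [List.cons_append, pvGreedy]
    split
    · rfl
    · exact ih ys _ _

lemma pvOuterA_eq (max_length : Int) :
    ∀ (document : List (List String)) (s : List String) (count : Int),
      pvOuterA max_length document s count = (pvGreedy max_length (pvBigramsB document) s count).1 := by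
  intro document
  induction document with
  | nil => intro s count; simp [pvOuterA, pvBigramsB, pvGreedy]
  | cons sentence rest ih =>
    intro s count
    have hbig : pvBigramsB (sentence :: rest) = pvToksFrom sentence 0 ++ pvBigramsB rest := by
      simp only [pvBigramsB, List.flatMap_cons, pvToksFrom]
      rw [PySem.List.slice_from sentence (by norm_num : (0:Int) ≤ 1)]
      norm_num
    rw [hbig, pvGreedy_append]
    simp only [pvOuterA, pvInnerA_eq]
    rcases hgr : pvGreedy max_length (pvToksFrom sentence 0) s count with ⟨s', c', b⟩
    cases b <;> simp [ih]

-- how many tokens A's greedy loop keeps, as a stand-alone count (c = running sum, n = kept so far)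
def pvGCount (max_length : Int) : List String → Int → Int → Nat
  | [], _, _ => 0
  | t :: rest, c, n =>
    if c + PySem.Str.len t + n > max_length then 0
    else pvGCount max_length rest (c + PySem.Str.len t) (n + 1) + 1

lemma pvGreedy_fst_eq_take (max_length : Int) :
    ∀ (toks s : List String) (c : Int),
      (pvGreedy max_length toks s c).1 = s ++ toks.take (pvGCount max_length toks c (s.length : Int)) := by
  intro toks
  induction toks with
  | nil => intro s c; simp [pvGreedy, pvGCount]
  | cons t rest ih =>
    intro s c
    simp only [pvGreedy, pvGCount]
    split
    · simp
    · rw [ih (s ++ [t]) (c + PySem.Str.len t)]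
      have hl : (((s ++ [t]).length : Nat) : Int) = (s.length : Int) + 1 := by simp
      rw [hl, List.take_succ_cons, List.append_assoc, List.singleton_append]

-- spec-side cumulative cost list
def pvCums : List String → Int → List Int
  | [], _ => []
  | t :: rest, b => (b + PySem.Str.len t + 1) :: pvCums rest (b + PySem.Str.len t + 1)

lemma pvCumB_eq : ∀ (toks : List String) (acc : List Int) (b : Int),
    pvCumB toks (acc ++ [b]) = (acc ++ [b]) ++ pvCums toks b := by
  intro toks
  induction toks with
  | nil => intro acc b; simp [pvCumB, pvCums]
  | cons t rest ih =>
    intro acc b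
    simp only [pvCumB, pvCums, PySem.List.pyGetD_neg_one_append_singleton]
    rw [show acc ++ [b] ++ [b + PySem.Str.len t + 1] = (acc ++ [b]) ++ [b + PySem.Str.len t + 1] by simp,
      ih (acc ++ [b]) (b + PySem.Str.len t + 1)]
    simp

lemma pvCums_mono : ∀ (toks : List String) (b x : Int), x ∈ pvCums toks b → b < x := by
  intro toks
  induction toks with
  | nil => intro b x hx; simp [pvCums] at hx
  | cons t rest ih =>
    intro b x hx
    have hlen : 0 ≤ PySem.Str.len t := by
      rw [PySem.Str.len_eq]; positivity
    simp only [pvCums, List.mem_cons] at hx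
    rcases hx with rfl | hx
    · omega
    · have := ih (b + PySem.Str.len t + 1) x hx
      omega

lemma pvGCount_eq_countP (max_length : Int) :
    ∀ (toks : List String) (c n b : Int), b = c + n →
      pvGCount max_length toks c n =
        (pvCums toks b).countP (fun x => decide (x - 1 ≤ max_length)) := by
  intro toks
  induction toks with
  | nil => intro c n b _; simp [pvGCount, pvCums]
  | cons t rest ih =>
    intro c n b hb
    simp only [pvGCount, pvCums]
    by_cases hcond : c + PySem.Str.len t + n > max_length
    · rw [if_pos hcond]
      symm
      rw [List.countP_eq_zero]
      intro x hx
      simp only [List.mem_cons] at hx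
      have hxgt : b + PySem.Str.len t ≤ x - 1 := by
        rcases hx with rfl | hx
        · omega
        · have := pvCums_mono rest (b + PySem.Str.len t + 1) x hx
          omega
      simp only [decide_eq_true_eq]
      omega
    · rw [if_neg hcond, List.countP_cons,
        ih (c + PySem.Str.len t) (n + 1) (b + PySem.Str.len t + 1) (by omega)]
      have hhead : decide (b + PySem.Str.len t + 1 - 1 ≤ max_length) = true :=
        decide_eq_true (by omega)
      rw [hhead, if_pos rfl]

theorem pv_main (document : List (List String)) (max_length : Int) :
    get_document_preview document max_length = get_document_preview_alt document max_length := by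
  unfold get_document_preview get_document_preview_alt
  rw [pvOuterA_eq]
  show PySem.Str.join "|" (pvGreedy max_length (pvBigramsB document) [] 0).1 =
    PySem.Str.join "|" ((pvBigramsB document).take
      ((PySem.List.slice (pvCumB (pvBigramsB document) [0]) (some 1) none).countP
        (fun c => decide (c - 1 ≤ max_length))))
  have hcum : pvCumB (pvBigramsB document) [0] = [(0:Int)] ++ pvCums (pvBigramsB document) 0 :=
    pvCumB_eq (pvBigramsB document) [] 0
  rw [hcum]
  rw [PySem.List.slice_from _ (by norm_num : (0:Int) ≤ 1)]
  simp only [Int.toNat_one, List.singleton_append, List.drop_succ_cons, List.drop_zero]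
  rw [pvGreedy_fst_eq_take]
  simp only [List.length_nil, Nat.cast_zero, List.nil_append]
  rw [pvGCount_eq_countP max_length (pvBigramsB document) 0 0 0 (by ring)]

-- ===== VERDICT (by name: the statement is the Claim_ definition above) =====
theorem get_document_preview_spec : Claim_equal_get_document_preview := by
  intro document max_length _
  unfold Spec_get_document_preview
  exact pv_main document max_length
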